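-- pv_equiv track=rewrite | github.com/OrangeChannel/acsuite | acsuite/__init__.py | _check_ordered
-- ===== SOURCE A (Python) =====
-- from typing import Dict, List, Optional, Tuple, Union
--
-- def _check_ordered(a: List[int], b: List[int]) -> bool:
--     """Checks if lists follow logical Python slicing."""
--     if len(a) != len(b):
--         raise ValueError('_check_ordered: lists must be same length')
--     if len(a) == 1 and len(b) == 1:
--         if a[0] >= b[0]:
--             return False
--
--     if not all(a[i] < a[i + 1] for i in range(len(a) - 1)):
--         return False  # checks if list a is ordered L to G
--     if not all(b[i] < a[i + 1] for i in range(len(a) - 1)):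
--         return False  # checks if all ends are less than next start
--     if not all(a[i] < b[i] for i in range(len(a))):
--         return False  # makes sure pair is at least one frame long
--
--     return True
-- ===== SOURCE B (Python) =====
-- def _check_ordered(a, b):
--     """Checks if lists follow logical Python slicing."""
--     if len(a) != len(b):
--         raise ValueError('_check_ordered: lists must be same length')
--     c = [x for pair in zip(a, b) for x in pair]
--     return all(c[i] < c[i + 1] for i in range(len(c) - 1))
-- ===== Notes on version B (the rewrite author's own statement) =====
-- stated objective: simpler
-- what changed: Replaced three separate index scans plus a length-1 special case by one strict-monotonicity pass over the interleaved sequence a[0],b[0],a[1],b[1],...; the 'a strictly increasing' scan is redundant by transitivity.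
import Mathlib
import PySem

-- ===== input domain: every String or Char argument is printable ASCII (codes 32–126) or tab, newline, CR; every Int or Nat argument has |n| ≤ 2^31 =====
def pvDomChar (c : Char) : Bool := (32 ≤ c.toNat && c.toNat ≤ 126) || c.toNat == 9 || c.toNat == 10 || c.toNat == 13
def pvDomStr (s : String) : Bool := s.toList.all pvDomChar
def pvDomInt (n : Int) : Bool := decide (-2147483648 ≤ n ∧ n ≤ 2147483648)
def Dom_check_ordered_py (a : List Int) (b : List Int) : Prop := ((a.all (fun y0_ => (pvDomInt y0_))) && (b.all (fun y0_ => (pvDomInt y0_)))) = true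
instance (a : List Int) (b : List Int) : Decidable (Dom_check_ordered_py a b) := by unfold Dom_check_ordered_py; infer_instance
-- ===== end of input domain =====

-- B replaces A's three conditional index scans and length-1 special case by one
-- strict-monotonicity pass over the interleaved sequence a0,b0,a1,b1,… (objective: simpler).

-- ===== PORT A =====
-- literal transliteration of A; the length-mismatch branch raises ValueError in Python
-- and is excluded by Pre_check_ordered_py (the value `false` there is arbitrary).
def check_ordered_py (a : List Int) (b : List Int) : Bool :=
  if a.length ≠ b.length then false
  else if a.length = 1 ∧ b.length = 1 ∧ b.getD 0 0 ≤ a.getD 0 0 then false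
  else if ¬ ((List.range (a.length - 1)).all fun i => decide (a.getD i 0 < a.getD (i + 1) 0)) then false
  else if ¬ ((List.range (a.length - 1)).all fun i => decide (b.getD i 0 < a.getD (i + 1) 0)) then false
  else if ¬ ((List.range a.length).all fun i => decide (a.getD i 0 < b.getD i 0)) then false
  else true

-- ===== PORT B =====
def check_ordered_py_alt (a : List Int) (b : List Int) : Bool :=
  if a.length ≠ b.length then false
  else
    let c := (a.zip b).flatMap (fun p => [p.1, p.2])
    (List.range (c.length - 1)).all fun i => decide (c.getD i 0 < c.getD (i + 1) 0)

-- ===== PRECONDITION & SPEC =====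
-- Pre_ excludes only the length-mismatch inputs, on which A raises ValueError.
def Pre_check_ordered_py (a : List Int) (b : List Int) : Prop := a.length = b.length
instance (a : List Int) (b : List Int) : Decidable (Pre_check_ordered_py a b) := by unfold Pre_check_ordered_py; infer_instance
def pvWitness_check_ordered_py : List Int × List Int := ([0, 2], [1, 3])

def Spec_check_ordered_py (a : List Int) (b : List Int) (out : Bool) : Prop := out = check_ordered_py_alt a b
instance (a : List Int) (b : List Int) (out : Bool) : Decidable (Spec_check_ordered_py a b out) := by unfold Spec_check_ordered_py; infer_instance

-- ===== CLAIM (what is proved, stated in full; the proofs are below) =====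
def Claim_equal_check_ordered_py : Prop := ∀ (a : List Int) (b : List Int), Dom_check_ordered_py a b → Pre_check_ordered_py a b → Spec_check_ordered_py a b (check_ordered_py a b)

-- ===== LEMMAS AND PROOFS =====

theorem interleave_length (a b : List Int) (h : a.length = b.length) :
    ((a.zip b).flatMap (fun p => [p.1, p.2])).length = 2 * a.length := by
  induction a generalizing b with
  | nil => simp
  | cons x a ih =>
    cases b with
    | nil => simp at h
    | cons y b =>
      have h' : a.length = b.length := by simpa using h
      simp [ih b h']; omega

theorem interleave_getD (a b : List Int) (h : a.length = b.length) (j : Nat) :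
    ((a.zip b).flatMap (fun p => [p.1, p.2])).getD j 0 =
      if j % 2 = 0 then a.getD (j / 2) 0 else b.getD (j / 2) 0 := by
  induction a generalizing b j with
  | nil =>
    cases b with
    | nil => simp
    | cons y b => simp at h
  | cons x a ih =>
    cases b with
    | nil => simp at h
    | cons y b =>
      have h' : a.length = b.length := by simpa using h
      match j with
      | 0 => simp
      | 1 => simp
      | (j + 2) =>
        have e1 : (j + 2) % 2 = j % 2 := by omega
        have e2 : (j + 2) / 2 = j / 2 + 1 := by omega
        simp only [List.zip_cons_cons, List.flatMap_cons, List.cons_append,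
          List.nil_append, List.getD_cons_succ, e1, e2]
        exact ih b h' j

theorem check_ordered_py_spec : Claim_equal_check_ordered_py := by
  intro a b _ h
  unfold Pre_check_ordered_py at h
  unfold Spec_check_ordered_py check_ordered_py check_ordered_py_alt
  have hlen := interleave_length a b h
  have hget := interleave_getD a b h
  simp only [ne_eq, ite_not]
  rw [if_pos h, if_pos h, Bool.eq_iff_iff]
  simp only [hlen, List.all_eq_true, List.mem_range, decide_eq_true_eq, hget]
  constructor
  · -- A's checks imply the interleaved sequence is strictly increasing
    intro hA
    split_ifs at hA with hsp h1 h2 h3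
    intro j hj
    rcases Nat.even_or_odd j with ⟨i, hi⟩ | ⟨i, hi⟩
    · -- j = 2i: need a_i < b_i
      have e0 : j % 2 = 0 := by omega
      have e1 : (j + 1) % 2 = 1 := by omega
      have e2 : j / 2 = i := by omega
      have e3 : (j + 1) / 2 = i := by omega
      simpa [e0, e1, e2, e3] using h3 i (by omega)
    · -- j = 2i+1: need b_i < a_{i+1}
      have e0 : j % 2 = 1 := by omega
      have e1 : (j + 1) % 2 = 0 := by omega
      have e2 : j / 2 = i := by omega
      have e3 : (j + 1) / 2 = i + 1 := by omega
      simpa [e0, e1, e2, e3] using h2 i (by omega)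
  · -- strict monotonicity of the interleave implies all of A's checks
    intro hB
    have hab : ∀ i < a.length, a.getD i 0 < b.getD i 0 := by
      intro i hi
      have e0 : 2 * i % 2 = 0 := by omega
      have e1 : (2 * i + 1) % 2 = 1 := by omega
      have e2 : 2 * i / 2 = i := by omega
      have e3 : (2 * i + 1) / 2 = i := by omega
      simpa [e0, e1, e2, e3] using hB (2 * i) (by omega)
    have hba : ∀ i < a.length - 1, b.getD i 0 < a.getD (i + 1) 0 := by
      intro i hi
      have e0 : (2 * i + 1) % 2 = 1 := by omega
      have e1 : (2 * i + 1 + 1) % 2 = 0 := by omega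
      have e2 : (2 * i + 1) / 2 = i := by omega
      have e3 : (2 * i + 1 + 1) / 2 = i + 1 := by omega
      simpa [e0, e1, e2, e3] using hB (2 * i + 1) (by omega)
    have hsp : ¬ (a.length = 1 ∧ b.length = 1 ∧ b.getD 0 0 ≤ a.getD 0 0) := by
      rintro ⟨h1, _, h3⟩
      exact absurd (hab 0 (by omega)) (by omega)
    have haa : ∀ i < a.length - 1, a.getD i 0 < a.getD (i + 1) 0 := by
      intro i hi
      exact lt_trans (hab i (by omega)) (hba i hi)
    rw [if_neg hsp, if_pos haa, if_pos hba, if_pos hab]
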